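-- pv_equiv track=rewrite | github.com/Georgi-Zahariev/ai-disaster-response | backend/mappers/visualization_mapper.py | _calculate_overall_severity
-- ===== SOURCE A (Python) =====
-- from typing import List, Dict, Any
--
-- def _calculate_overall_severity(
--
--     events: List[Dict[str, Any]]
-- ) -> str:
--     """Calculate overall situation severity."""
--     if not events:
--         return "informational"
--
--     # Return highest severity present
--     severity_order = ["critical", "high", "moderate", "low", "informational"]
--     for sev in severity_order:
--         if any(e.get("severity") == sev for e in events):
--             return sev
--
--     return "informational"
-- ===== SOURCE B (Python) =====
-- from typing import List, Dict, Any
--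
-- _RANK = {"critical": 0, "high": 1, "moderate": 2, "low": 3, "informational": 4}
-- _NAME = ["critical", "high", "moderate", "low", "informational"]
--
-- def _calculate_overall_severity(events: List[Dict[str, Any]]) -> str:
--     """Calculate overall situation severity (single-pass min-rank reduction)."""
--     best = 5  # 5 = no known severity seen
--     for e in events:
--         r = _RANK.get(e.get("severity"), 5)
--         if r < best:
--             best = r
--     return _NAME[best] if best < 5 else "informational"
-- ===== Notes on version B (the rewrite author's own statement) =====
-- stated objective: alternative
-- what changed: Replaces the staged search (for each severity level in priority order, scan all events with any()) by a single-pass numeric min-reduction: each event's severity is mapped to a rank once, the minimum rank is accumulated in one loop, and the name of the minimum rank is returned (5 = unknown/absent falls back to 'informational').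
import Mathlib
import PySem

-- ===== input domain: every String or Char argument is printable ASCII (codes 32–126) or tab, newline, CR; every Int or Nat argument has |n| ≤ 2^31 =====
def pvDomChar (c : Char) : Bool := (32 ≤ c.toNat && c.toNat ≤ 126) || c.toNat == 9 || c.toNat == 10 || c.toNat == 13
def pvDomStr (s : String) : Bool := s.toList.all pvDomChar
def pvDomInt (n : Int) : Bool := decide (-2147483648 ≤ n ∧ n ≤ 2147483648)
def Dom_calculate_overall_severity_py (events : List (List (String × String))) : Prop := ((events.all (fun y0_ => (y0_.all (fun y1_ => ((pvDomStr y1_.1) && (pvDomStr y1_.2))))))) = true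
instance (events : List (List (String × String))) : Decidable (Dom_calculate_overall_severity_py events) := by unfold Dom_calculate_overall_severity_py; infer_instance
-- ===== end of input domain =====

-- ===== PORT A =====
-- one-line: B replaces A's staged per-level any() scans by a single-pass min-rank reduction (alternative algorithm, one pass over events).
def pvSevOrder : List String := ["critical", "high", "moderate", "low", "informational"]

-- A: for sev in severity_order: if any(e.get("severity") == sev): return sev; default "informational"
def calculate_overall_severity_py (events : List (List (String × String))) : String :=
  if events = [] then "informational"
  else
    match pvSevOrder.find? (fun sev => events.any (fun e => PySem.Dict.get? (PySem.Dict.mk e) "severity" == some sev)) with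
    | some s => s
    | none => "informational"

-- ===== PORT B =====
-- _RANK.get(x, 5): literal-dict lookup, ported as a match over the five keys (None key -> default 5)
def pvRank (x : Option String) : Nat :=
  match x with
  | none => 5
  | some t =>
    if t = "critical" then 0 else if t = "high" then 1 else if t = "moderate" then 2
    else if t = "low" then 3 else if t = "informational" then 4 else 5

def calculate_overall_severity_py_alt (events : List (List (String × String))) : String :=
  let best := events.foldl
    (fun b e =>
      let r := pvRank (PySem.Dict.get? (PySem.Dict.mk e) "severity")
      if r < b then r else b) 5
  -- _NAME is the same literal list as severity_order, so B's port reuses pvSevOrder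
  if best < 5 then pvSevOrder.getD best "informational" else "informational"

-- ===== PRECONDITION & SPEC =====
def Spec_calculate_overall_severity_py (events : List (List (String × String))) (out : String) : Prop := out = calculate_overall_severity_py_alt events
instance (events : List (List (String × String))) (out : String) : Decidable (Spec_calculate_overall_severity_py events out) := by unfold Spec_calculate_overall_severity_py; infer_instance

-- ===== CLAIM (what is proved, stated in full; the proofs are below) =====
def Claim_equal_calculate_overall_severity_py : Prop := ∀ (events : List (List (String × String))), Dom_calculate_overall_severity_py events → Spec_calculate_overall_severity_py events (calculate_overall_severity_py events)

-- ===== LEMMAS AND PROOFS =====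

-- the fold of the minimum of a list of naturals, started at 5, is the least k < 5 occurring in the list (else 5)
lemma pv_min_char (l : List Nat) :
    l.foldl Nat.min 5 =
      if 0 ∈ l then 0 else if 1 ∈ l then 1 else if 2 ∈ l then 2 else if 3 ∈ l then 3
      else if 4 ∈ l then 4 else 5 := by
  induction l with
  | nil => simp
  | cons a t ih =>
    rw [List.foldl_cons]
    rw [show Nat.min 5 a = Nat.min a 5 from Nat.min_comm 5 a, List.foldl_assoc, ih]
    simp only [List.mem_cons]
    by_cases h0 : (0:Nat) ∈ t <;> by_cases h1 : (1:Nat) ∈ t <;> by_cases h2 : (2:Nat) ∈ t <;>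
      by_cases h3 : (3:Nat) ∈ t <;> by_cases h4 : (4:Nat) ∈ t <;>
      simp [h0, h1, h2, h3, h4, Nat.min_def] <;> (try split_ifs) <;> omega

-- per-element bridge: comparing the severity with a named level is comparing its rank with that level's index
lemma pv_rank_iff (x : Option String) :
    ((x == some "critical") = (pvRank x == 0)) ∧ ((x == some "high") = (pvRank x == 1)) ∧
    ((x == some "moderate") = (pvRank x == 2)) ∧ ((x == some "low") = (pvRank x == 3)) ∧
    ((x == some "informational") = (pvRank x == 4)) := by
  cases x with
  | none => simp [pvRank]
  | some t =>
    simp only [pvRank]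
    split_ifs <;> simp_all

-- the any() scan for one level is membership of its index in the rank image
lemma pv_any_eq (events : List (List (String × String))) (s : String) (k : Nat)
    (h : ∀ x : Option String, (x == some s) = (pvRank x == k)) :
    (events.any (fun e => PySem.Dict.get? (PySem.Dict.mk e) "severity" == some s))
      = decide (k ∈ events.map (fun e => pvRank (PySem.Dict.get? (PySem.Dict.mk e) "severity"))) := by
  simp only [h]
  rw [Bool.eq_iff_iff]
  simp only [List.any_eq_true, decide_eq_true_eq, List.mem_map, beq_iff_eq]

-- ===== VERDICT (by name: the statement is the Claim_ definition above) =====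
theorem calculate_overall_severity_py_spec : Claim_equal_calculate_overall_severity_py := by
  intro events _
  unfold Spec_calculate_overall_severity_py calculate_overall_severity_py calculate_overall_severity_py_alt
  by_cases hE : events = []
  · subst hE; rfl
  · simp only [if_neg hE]
    have hB : events.foldl
        (fun b e =>
          let r := pvRank (PySem.Dict.get? (PySem.Dict.mk e) "severity")
          if r < b then r else b) 5
        = (events.map (fun e => pvRank (PySem.Dict.get? (PySem.Dict.mk e) "severity"))).foldl Nat.min 5 := by
      rw [List.foldl_map]
      congr 1
      funext b e
      simp only [Nat.min_def]
      split_ifs <;> omega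
    rw [hB, pv_min_char]
    set l := events.map (fun e => pvRank (PySem.Dict.get? (PySem.Dict.mk e) "severity")) with hl
    have h0 := pv_any_eq events "critical" 0 (fun x => (pv_rank_iff x).1)
    have h1 := pv_any_eq events "high" 1 (fun x => (pv_rank_iff x).2.1)
    have h2 := pv_any_eq events "moderate" 2 (fun x => (pv_rank_iff x).2.2.1)
    have h3 := pv_any_eq events "low" 3 (fun x => (pv_rank_iff x).2.2.2.1)
    have h4 := pv_any_eq events "informational" 4 (fun x => (pv_rank_iff x).2.2.2.2)
    rw [← hl] at h0 h1 h2 h3 h4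
    by_cases m0 : (0:Nat) ∈ l <;> by_cases m1 : (1:Nat) ∈ l <;> by_cases m2 : (2:Nat) ∈ l <;>
      by_cases m3 : (3:Nat) ∈ l <;> by_cases m4 : (4:Nat) ∈ l <;>
      simp [pvSevOrder, List.find?, h0, h1, h2, h3, h4, m0, m1, m2, m3, m4]
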